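-- pv_equiv track=rewrite | github.com/0xZKc0de/leetcode | medium/1513/SolutionNotAccepted.py | numSub
-- ===== SOURCE A (Python) =====
-- def numSub(s: str) -> int:
--
--     # get all the substrings of string.
--     def find_substrings(s):
--         res = []
--         for i in range(len(s)):
--             for j in range(i, len(s)):
--                 res.append(s[i:j+1])
--         return res
--
--     count = 0
--     arr = find_substrings(s)
--
--     for i in range(1, len(arr) + 1):
--         count += arr.count("1" * i)
--     return count
-- ===== SOURCE B (Python) =====
-- def numSub(s: str) -> int:
--     total = 0
--     cur = 0
--     for c in s:
--         if c == '1':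
--             cur += 1
--         else:
--             total += cur * (cur + 1) // 2
--             cur = 0
--     return total + cur * (cur + 1) // 2
-- ===== Notes on version B (the rewrite author's own statement) =====
-- stated objective: faster
-- what changed: Instead of materialising every substring and counting, for each possible length, how many entries equal the all-ones string of that length, B makes a single pass keeping the length of the current run of one-characters and adds k*(k+1)//2 per maximal run.
import Mathlib
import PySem

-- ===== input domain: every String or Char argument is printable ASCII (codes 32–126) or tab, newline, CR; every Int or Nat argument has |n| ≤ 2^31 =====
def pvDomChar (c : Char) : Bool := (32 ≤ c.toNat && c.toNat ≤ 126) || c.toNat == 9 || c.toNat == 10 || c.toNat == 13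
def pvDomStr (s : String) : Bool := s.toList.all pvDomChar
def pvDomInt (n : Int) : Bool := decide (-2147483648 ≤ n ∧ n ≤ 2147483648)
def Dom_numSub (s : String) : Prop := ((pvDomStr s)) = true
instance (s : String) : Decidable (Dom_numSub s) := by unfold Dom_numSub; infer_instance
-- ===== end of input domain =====

-- B replaces A's "materialise every substring, then count the all-ones entries of each length"
-- with a single pass adding k*(k+1)//2 for each maximal run of one-characters (objective: faster).

-- ===== PORT A =====
-- helper find_substrings, on the code-point list (string slicing is PySem.Chars.slice = List.slice on toList)
def pvFindSubstrings (t : List Char) : List (List Char) :=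
  (PySem.List.pyRange 0 (t.length : Int) 1).foldl (fun res i =>
    (PySem.List.pyRange i (t.length : Int) 1).foldl (fun res j =>
      res ++ [PySem.List.slice t (some i) (some (j + 1))]) res) []

def numSub (s : String) : Int :=
  let arr := pvFindSubstrings s.toList
  -- "1" * i  is  PySem.List.pyRepeat ['1'] i
  (PySem.List.pyRange 1 ((arr.length : Int) + 1) 1).foldl
    (fun count i => count + (arr.count (PySem.List.pyRepeat ['1'] i) : Int)) 0

-- ===== PORT B =====
def numSub_alt (s : String) : Int :=
  let st := s.toList.foldl (fun (p : Int × Int) c =>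
      if c == '1' then (p.1, p.2 + 1)
      else (p.1 + PySem.Int.floordiv (p.2 * (p.2 + 1)) 2, 0)) (0, 0)
  st.1 + PySem.Int.floordiv (st.2 * (st.2 + 1)) 2

-- ===== PRECONDITION & SPEC =====
def Spec_numSub (s : String) (out : Int) : Prop := out = numSub_alt s
instance (s : String) (out : Int) : Decidable (Spec_numSub s out) := by unfold Spec_numSub; infer_instance

-- ===== CLAIM (what is proved, stated in full; the proofs are below) =====
def Claim_equal_numSub : Prop := ∀ (s : String), Dom_numSub s → Spec_numSub s (numSub s)

-- ===== LEMMAS AND PROOFS =====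

def pvRunFrom (t : List Char) (i : Nat) : Nat := ((t.drop i).takeWhile (· == '1')).length

def pvSA (t : List Char) : Nat := ∑ i ∈ Finset.range t.length, pvRunFrom t i

def pvTrail (t : List Char) : Nat := (t.reverse.takeWhile (· == '1')).length

def pvTri (k : Nat) : Nat := k * (k + 1) / 2

lemma pvTri_succ (k : Nat) : pvTri (k + 1) = pvTri k + (k + 1) := by
  unfold pvTri
  rw [show (k + 1) * (k + 1 + 1) = k * (k + 1) + 2 * (k + 1) by ring,
      Nat.add_mul_div_left _ _ (by norm_num)]

lemma pvFloordiv_tri (k : Nat) :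
    PySem.Int.floordiv ((k : Int) * ((k : Int) + 1)) 2 = (pvTri k : Int) := by
  have h : ((k:Int) * ((k:Int)+1)) = ((k*(k+1) : Nat) : Int) := by push_cast; ring
  rw [PySem.Int.floordiv, h, Int.fdiv_eq_ediv, pvTri]
  rfl

-- take m of l is all-q  ↔  m ≤ length of takeWhile q l   (for m ≤ l.length)

lemma pvTakeAll_iff (q : Char → Bool) (l : List Char) (m : Nat) (hm : m ≤ l.length) :
    (l.take m).all q = true ↔ m ≤ (l.takeWhile q).length := by
  induction l generalizing m with
  | nil => simp at hm; simp [hm]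
  | cons a l ih =>
    cases m with
    | zero => simp
    | succ m =>
      simp only [List.take_succ_cons, List.all_cons, List.takeWhile_cons, Bool.and_eq_true]
      cases hqa : q a with
      | true => simpa [hqa] using ih m (by simpa using hm)
      | false => simp [hqa]

lemma pvTrail_le (t : List Char) : pvTrail t ≤ t.length := by
  have := (List.takeWhile_prefix (l := t.reverse) (· == '1')).length_le
  simpa [pvTrail] using this

-- drop i t all-ones ↔ the trailing run covers it

lemma pvDropAll_iff (t : List Char) (i : Nat) (hi : i ≤ t.length) :
    (t.drop i).all (· == '1') = true ↔ t.length - i ≤ pvTrail t := by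
  have h1 : (t.drop i).all (· == '1') = ((t.drop i).reverse).all (· == '1') := by simp
  have h2 : (t.drop i).reverse = t.reverse.take (t.length - i) := List.reverse_drop
  rw [h1, h2]
  exact pvTakeAll_iff _ _ _ (by simpa using Nat.sub_le _ _)

lemma pvRunFrom_le (t : List Char) (i : Nat) : pvRunFrom t i ≤ t.length - i := by
  have := (List.takeWhile_prefix (l := t.drop i) (· == '1')).length_le
  simpa [pvRunFrom] using this

lemma pvRunFrom_snoc (p : List Char) (c : Char) (i : Nat) (hi : i < p.length) :
    pvRunFrom (p ++ [c]) i
      = pvRunFrom p i + (if p.length - i ≤ pvTrail p ∧ c = '1' then 1 else 0) := by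
  unfold pvRunFrom
  rw [List.drop_append_of_le_length (by omega), List.takeWhile_append]
  by_cases hall : (p.drop i).all (· == '1') = true
  · have heq : (p.drop i).takeWhile (· == '1') = p.drop i := by
      rw [List.takeWhile_eq_self_iff]; simpa [List.all_eq_true] using hall
    have hcov : p.length - i ≤ pvTrail p := (pvDropAll_iff p i (by omega)).1 hall
    rw [if_pos (by rw [heq])]
    by_cases hc : c = '1'
    · simp [heq, hc, hcov]
    · have : (c == '1') = false := by simp [hc]
      simp [heq, hc, hcov, List.takeWhile, this]
  · have hncov : ¬ (p.length - i ≤ pvTrail p) := fun h => hall ((pvDropAll_iff p i (by omega)).2 h)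
    have hne : (p.drop i).takeWhile (· == '1') ≠ p.drop i := by
      intro h; exact hall (by rw [List.takeWhile_eq_self_iff] at h; simpa [List.all_eq_true] using h)
    rw [if_neg (fun hlen => hne ((List.takeWhile_prefix _).eq_of_length (by simpa using hlen)))]
    simp [hncov]

lemma pvSA_snoc (p : List Char) (c : Char) :
    pvSA (p ++ [c]) = pvSA p + (if c = '1' then pvTrail p + 1 else 0) := by
  unfold pvSA
  have hlen : (p ++ [c]).length = p.length + 1 := by simp
  rw [hlen, Finset.sum_range_succ]
  have hlast : pvRunFrom (p ++ [c]) p.length = if c = '1' then 1 else 0 := by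
    unfold pvRunFrom
    rw [List.drop_append_of_le_length (le_refl _)]
    by_cases hc : c = '1' <;> simp [List.takeWhile, hc]
  have hstep : ∀ i ∈ Finset.range p.length,
      pvRunFrom (p ++ [c]) i
        = pvRunFrom p i + (if p.length - i ≤ pvTrail p ∧ c = '1' then 1 else 0) := by
    intro i hi
    exact pvRunFrom_snoc p c i (Finset.mem_range.1 hi)
  rw [Finset.sum_congr rfl hstep, Finset.sum_add_distrib, hlast]
  by_cases hc : c = '1'
  · have : ∀ i, (p.length - i ≤ pvTrail p ∧ c = '1') ↔ (p.length - pvTrail p ≤ i) := by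
      intro i; constructor
      · rintro ⟨h, _⟩; omega
      · intro h; exact ⟨by omega, hc⟩
    simp only [this]
    have hfil : Finset.filter (fun i => p.length - pvTrail p ≤ i) (Finset.range p.length)
        = Finset.Ico (p.length - pvTrail p) p.length := by
      ext i; simp [Finset.mem_filter, Finset.mem_range, Finset.mem_Ico]; omega
    rw [Finset.sum_boole]
    have htl := pvTrail_le p
    rw [hfil]
    simp [Nat.card_Ico, hlast, hc]
    omega
  · simp [hc, hlast]

lemma pvTrail_snoc (p : List Char) (c : Char) :
    pvTrail (p ++ [c]) = if c = '1' then pvTrail p + 1 else 0 := by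
  unfold pvTrail
  rw [List.reverse_append]
  by_cases hc : c = '1' <;> simp [List.takeWhile, hc]

lemma pvAlt_inv (t : List Char) :
    t.foldl (fun (p : Int × Int) c =>
      if c == '1' then (p.1, p.2 + 1)
      else (p.1 + PySem.Int.floordiv (p.2 * (p.2 + 1)) 2, 0)) (0, 0)
    = ((pvSA t : Int) - (pvTri (pvTrail t) : Int), (pvTrail t : Int)) := by
  induction t using List.reverseRecOn with
  | nil => simp [pvSA, pvTrail, pvTri]
  | append_singleton p c ih =>
    rw [List.foldl_append, ih]
    simp only [List.foldl_cons, List.foldl_nil]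
    by_cases hc : c = '1'
    · rw [if_pos (by simp [hc])]
      rw [pvSA_snoc, pvTrail_snoc, if_pos hc, pvTri_succ]
      rw [Prod.mk.injEq]
      push_cast
      exact ⟨by ring, rfl⟩
    · rw [if_neg (by simp [hc])]
      rw [pvSA_snoc, pvTrail_snoc, if_neg hc, pvFloordiv_tri]
      rw [Prod.mk.injEq]
      refine ⟨?_, by simp⟩
      simp [pvTri]

theorem numSub_alt_eq (s : String) : numSub_alt s = (pvSA s.toList : Int) := by
  unfold numSub_alt
  rw [pvAlt_inv]
  simp only []
  rw [pvFloordiv_tri]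
  ring

lemma pvSumMapRangeNat (f : Nat → Nat) (n : Nat) :
    ((List.range n).map f).sum = ∑ i ∈ Finset.range n, f i := by
  induction n with
  | zero => simp
  | succ n ih => simp [List.range_succ, Finset.sum_range_succ, ih]

lemma pvCountP_flatMap {α β : Type} (p : β → Bool) (l : List α) (g : α → List β) :
    (l.flatMap g).countP p = (l.map (fun x => (g x).countP p)).sum := by
  induction l with
  | nil => simp
  | cons a l ih => simp [List.flatMap_cons, List.countP_append, ih]

lemma pvCountP_range_lt (m r : Nat) (h : r ≤ m) :
    (List.range m).countP (fun k => decide (k < r)) = r := by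
  induction m with
  | zero => have : r = 0 := Nat.le_zero.mp h; subst this; simp
  | succ m ih =>
    by_cases hr : r ≤ m
    · have h1 : (decide (m < r)) = false := by simp; omega
      simp [List.range_succ, List.countP_append, ih hr, List.countP_cons, h1]
    · have hr1 : r = m + 1 := by omega
      subst hr1
      have h2 : (List.range m).countP (fun k => decide (k < m + 1)) = m := by
        rw [List.countP_eq_length.2]
        · exact List.length_range
        · intro k hk
          simp only [List.mem_range] at hk
          simp; omega
      rw [List.range_succ, List.countP_append, h2]
      simp

-- clean structural form of find_substrings

lemma pvArr_eq (t : List Char) :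
    pvFindSubstrings t
      = (List.range t.length).flatMap (fun i =>
          (List.range (t.length - i)).map (fun k => (t.drop i).take (k + 1))) := by
  unfold pvFindSubstrings
  simp only [PySem.List.foldl_append_singleton_eq_map]
  rw [PySem.List.foldl_append_eq_flatMap]
  rw [List.nil_append]
  rw [PySem.List.pyRange_one]
  simp only [Int.sub_zero, Int.toNat_natCast]
  rw [List.flatMap_map]
  apply List.flatMap_congr
  intro i hi
  rw [List.mem_range] at hi
  rw [PySem.List.pyRange_one]
  have h1 : (((t.length : Int)) - (0 + (i : Int))).toNat = t.length - i := by omega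
  rw [h1, List.map_map]
  apply List.map_congr_left
  intro k hk
  rw [List.mem_range] at hk
  have h2 : (i : Int) + (k : Int) + 1 = (i : Int) + ((k + 1 : Nat) : Int) := by push_cast; ring
  simp only [Function.comp_apply, h2, zero_add]
  rw [PySem.List.slice_natCast_add]

-- Σ_{k<L} count of "1"*(k+1) = number of nonempty all-ones entries (each entry has length in [1,L])

lemma pvCountOnesSum (arr : List (List Char)) (L : Nat)
    (h : ∀ w ∈ arr, 1 ≤ w.length ∧ w.length ≤ L) :
    ∑ k ∈ Finset.range L, arr.count (List.replicate (k + 1) '1')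
      = arr.countP (fun w => w == List.replicate w.length '1') := by
  induction arr with
  | nil => simp
  | cons a arr ih =>
    have ha := h a (by simp)
    have harr : ∀ w ∈ arr, 1 ≤ w.length ∧ w.length ≤ L := fun w hw => h w (by simp [hw])
    simp only [List.count_cons, List.countP_cons]
    rw [Finset.sum_add_distrib, ih harr]
    congr 1
    by_cases hb : a = List.replicate a.length '1'
    · rw [Finset.sum_eq_single (a.length - 1)]
      · have hlen : a.length - 1 + 1 = a.length := by omega
        rw [hlen]
      · intro k _ hk
        have hne : a ≠ List.replicate (k + 1) '1' := by
          intro he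
          apply hk
          have : a.length = k + 1 := by rw [he]; simp
          omega
        simp [hne]
      · intro hmem
        exfalso
        exact hmem (Finset.mem_range.2 (by omega))
    · have hz : ∀ k ∈ Finset.range L, (if (a == List.replicate (k + 1) '1') = true then 1 else 0) = 0 := by
        intro k _
        have hne : a ≠ List.replicate (k + 1) '1' := by
          intro he
          apply hb
          have hl : a.length = k + 1 := by rw [he]; simp
          rw [hl]; exact he
        simp [hne]
      rw [Finset.sum_congr rfl hz]
      simp [hb]

lemma pvInnerCount (t : List Char) (i : Nat) (hi : i < t.length) :
    ((List.range (t.length - i)).map (fun k => (t.drop i).take (k + 1))).countP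
        (fun w => w == List.replicate w.length '1')
      = pvRunFrom t i := by
  rw [List.countP_map]
  have hcong : ∀ k ∈ List.range (t.length - i),
      ((fun w => w == List.replicate w.length '1') ∘ (fun k => (t.drop i).take (k + 1))) k
        = decide (k < pvRunFrom t i) := by
    intro k hk
    rw [List.mem_range] at hk
    have hlen : ((t.drop i).take (k + 1)).length = k + 1 := by
      rw [List.length_take, List.length_drop]; omega
    have hdi : k + 1 ≤ (t.drop i).length := by rw [List.length_drop]; omega
    have hiff := pvTakeAll_iff (· == '1') (t.drop i) (k + 1) hdi
    simp only [Function.comp_apply, hlen, pvRunFrom]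
    rw [Bool.eq_iff_iff]
    simp only [beq_iff_eq, decide_eq_true_eq]
    rw [List.eq_replicate_iff]
    constructor
    · rintro ⟨-, hall⟩
      have h1 : ((t.drop i).take (k + 1)).all (· == '1') = true := by
        simp only [List.all_eq_true, beq_iff_eq]; exact hall
      have h2 := hiff.1 h1
      omega
    · intro hlt
      have h1 := hiff.2 (by omega)
      refine ⟨hlen, ?_⟩
      simpa [List.all_eq_true] using h1
  rw [List.countP_congr (fun k hk => by rw [hcong k hk])]
  exact pvCountP_range_lt _ _ (by have := pvRunFrom_le t i; omega)

lemma pvCountPArr (t : List Char) :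
    (pvFindSubstrings t).countP (fun w => w == List.replicate w.length '1') = pvSA t := by
  rw [pvArr_eq, pvCountP_flatMap, pvSumMapRangeNat, pvSA]
  apply Finset.sum_congr rfl
  intro i hi
  exact pvInnerCount t i (Finset.mem_range.1 hi)

lemma pvArr_mem_len (t : List Char) (w : List Char) (hw : w ∈ pvFindSubstrings t) :
    1 ≤ w.length ∧ w.length ≤ t.length := by
  rw [pvArr_eq] at hw
  rw [List.mem_flatMap] at hw
  obtain ⟨i, hi, hw⟩ := hw
  rw [List.mem_range] at hi
  rw [List.mem_map] at hw
  obtain ⟨k, hk, rfl⟩ := hw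
  rw [List.mem_range] at hk
  rw [List.length_take, List.length_drop]
  omega

lemma pvArr_len_ge (t : List Char) (h : 1 ≤ t.length) :
    t.length ≤ (pvFindSubstrings t).length := by
  rw [pvArr_eq, List.length_flatMap, pvSumMapRangeNat]
  refine le_trans ?_ (Finset.single_le_sum (fun _ _ => Nat.zero_le _)
      (Finset.mem_range.2 (show 0 < t.length by omega)))
  simp

lemma pvSumMapRangeInt (f : Nat → Nat) (n : Nat) :
    ((List.range n).map (fun k => ((f k : Nat) : Int))).sum
      = ((∑ i ∈ Finset.range n, f i : Nat) : Int) := by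
  induction n with
  | zero => simp
  | succ n ih => simp [List.range_succ, Finset.sum_range_succ, ih]

lemma pvCountLoop (arr : List (List Char))
    (h : ∀ w ∈ arr, 1 ≤ w.length ∧ w.length ≤ arr.length) :
    (PySem.List.pyRange 1 ((arr.length : Int) + 1) 1).foldl
      (fun count i => count + (arr.count (PySem.List.pyRepeat ['1'] i) : Int)) 0
    = (arr.countP (fun w => w == List.replicate w.length '1') : Int) := by
  rw [PySem.List.foldl_add]
  rw [PySem.List.pyRange_one]
  have h1 : (((arr.length : Int) + 1) - 1).toNat = arr.length := by omega
  rw [h1, List.map_map]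
  have hmap : ∀ k ∈ List.range arr.length,
      ((fun i => (arr.count (PySem.List.pyRepeat ['1'] i) : Int)) ∘ (fun k : Nat => (1 : Int) + k)) k
        = ((arr.count (List.replicate (k + 1) '1') : Nat) : Int) := by
    intro k _
    simp only [Function.comp_apply]
    rw [PySem.List.pyRepeat_singleton]
    have h2 : ((1 : Int) + k).toNat = k + 1 := by omega
    rw [h2]
  rw [List.map_congr_left hmap]
  rw [pvSumMapRangeInt (fun k => arr.count (List.replicate (k + 1) '1'))]
  rw [pvCountOnesSum arr arr.length h]
  simp

theorem numSub_eq (s : String) : numSub s = (pvSA s.toList : Int) := by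
  unfold numSub
  simp only []
  by_cases h0 : s.toList.length = 0
  · have ht : s.toList = [] := List.eq_nil_of_length_eq_zero h0
    rw [ht]
    decide
  · have h1 : 1 ≤ s.toList.length := by omega
    rw [pvCountLoop _ (fun w hw => ⟨(pvArr_mem_len _ w hw).1,
        le_trans (pvArr_mem_len _ w hw).2 (pvArr_len_ge _ h1)⟩)]
    rw [pvCountPArr]

-- ===== VERDICT (by name: the statement is the Claim_ definition above) =====
theorem numSub_spec : Claim_equal_numSub := by
  intro s _
  unfold Spec_numSub
  rw [numSub_eq, numSub_alt_eq]
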